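-- pv_equiv track=rewrite | github.com/kying321/trade_test | system/scripts/build_price_action_breakout_pullback_exit_risk_break_even_sidecar_sim_only.py | classify_sidecar_decision
-- ===== SOURCE A (Python) =====
-- from typing import Any
--
-- def text(value: Any) -> str:
--     return str(value or "").strip()
--
-- def classify_sidecar_decision(windows: list[dict[str, Any]]) -> str:
--     anchor_no_be_dual = any(
--         text(row.get("winner_by_aggregate_return")) == "anchor_no_be"
--         and text(row.get("winner_by_aggregate_objective")) == "anchor_no_be"
--         for row in windows
--     )
--     anchor_with_be_dual = any(
--         text(row.get("winner_by_aggregate_return")) == "anchor_with_be"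
--         and text(row.get("winner_by_aggregate_objective")) == "anchor_with_be"
--         for row in windows
--     )
--     tie_dual = windows and all(
--         text(row.get("winner_by_aggregate_return")) == "tie"
--         and text(row.get("winner_by_aggregate_objective")) == "tie"
--         for row in windows
--     )
--     if tie_dual:
--         return "break_even_sidecar_no_observed_delta_keep_anchor"
--     if anchor_no_be_dual and not anchor_with_be_dual:
--         return "break_even_sidecar_not_promising_keep_anchor"
--     if anchor_with_be_dual and not anchor_no_be_dual:
--         return "break_even_sidecar_positive_watch_only"
--     if anchor_no_be_dual and anchor_with_be_dual:
--         return "break_even_sidecar_mixed_keep_anchor_watch_only"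
--     return "break_even_sidecar_inconclusive_keep_anchor"
-- ===== SOURCE B (Python) =====
-- def classify_sidecar_decision(windows):
--     all_tie = bool(windows)
--     found_no_be = False
--     found_with_be = False
--     for row in windows:
--         r = str(row.get("winner_by_aggregate_return") or "").strip()
--         o = str(row.get("winner_by_aggregate_objective") or "").strip()
--         if r == "anchor_no_be" and o == "anchor_no_be":
--             found_no_be = True
--         if r == "anchor_with_be" and o == "anchor_with_be":
--             found_with_be = True
--         if not (r == "tie" and o == "tie"):
--             all_tie = False
--     if all_tie:
--         return "break_even_sidecar_no_observed_delta_keep_anchor"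
--     if found_no_be and not found_with_be:
--         return "break_even_sidecar_not_promising_keep_anchor"
--     if found_with_be and not found_no_be:
--         return "break_even_sidecar_positive_watch_only"
--     if found_no_be and found_with_be:
--         return "break_even_sidecar_mixed_keep_anchor_watch_only"
--     return "break_even_sidecar_inconclusive_keep_anchor"
-- ===== Notes on version B (the rewrite author's own statement) =====
-- stated objective: alternative
-- what changed: Replaces A's three separate generator scans (two any() passes and an all() pass) with a single loop that normalizes each row's two winner fields once and maintains the three flags together, then applies the same classification ladder.
import Mathlib
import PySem

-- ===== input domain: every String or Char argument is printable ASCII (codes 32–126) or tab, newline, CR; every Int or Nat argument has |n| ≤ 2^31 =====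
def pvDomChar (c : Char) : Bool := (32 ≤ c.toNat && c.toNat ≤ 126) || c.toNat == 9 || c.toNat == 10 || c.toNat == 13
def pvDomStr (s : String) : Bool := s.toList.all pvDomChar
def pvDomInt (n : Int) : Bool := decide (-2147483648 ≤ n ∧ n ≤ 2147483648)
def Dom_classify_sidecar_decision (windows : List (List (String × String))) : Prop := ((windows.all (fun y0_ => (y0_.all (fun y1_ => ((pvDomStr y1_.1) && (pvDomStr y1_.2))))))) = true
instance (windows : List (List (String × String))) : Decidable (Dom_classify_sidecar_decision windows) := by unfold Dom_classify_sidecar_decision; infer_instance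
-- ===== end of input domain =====

-- B collapses A's three generator scans into one loop keeping all three flags, with each row's fields normalized once; same classification ladder (same return value; simpler single pass).
-- ===== PORT A =====
-- text(row.get(key)) = str(row.get(key) or "").strip(): for Option String this is strip of getD ""
def pvText (v : Option String) : String := PySem.Str.strip (v.getD "")

def classify_sidecar_decision (windows : List (List (String × String))) : String :=
  let anchor_no_be_dual := windows.any (fun row =>
    pvText ((PySem.Dict.mk row).get? "winner_by_aggregate_return") == "anchor_no_be"
    && pvText ((PySem.Dict.mk row).get? "winner_by_aggregate_objective") == "anchor_no_be")
  let anchor_with_be_dual := windows.any (fun row =>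
    pvText ((PySem.Dict.mk row).get? "winner_by_aggregate_return") == "anchor_with_be"
    && pvText ((PySem.Dict.mk row).get? "winner_by_aggregate_objective") == "anchor_with_be")
  let tie_dual := !windows.isEmpty && windows.all (fun row =>
    pvText ((PySem.Dict.mk row).get? "winner_by_aggregate_return") == "tie"
    && pvText ((PySem.Dict.mk row).get? "winner_by_aggregate_objective") == "tie")
  if tie_dual then "break_even_sidecar_no_observed_delta_keep_anchor"
  else if anchor_no_be_dual && !anchor_with_be_dual then "break_even_sidecar_not_promising_keep_anchor"
  else if anchor_with_be_dual && !anchor_no_be_dual then "break_even_sidecar_positive_watch_only"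
  else if anchor_no_be_dual && anchor_with_be_dual then "break_even_sidecar_mixed_keep_anchor_watch_only"
  else "break_even_sidecar_inconclusive_keep_anchor"

-- ===== PORT B =====
-- one fold over windows carrying (all_tie, found_no_be, found_with_be)
def classify_sidecar_decision_alt (windows : List (List (String × String))) : String :=
  let st := windows.foldl (fun (s : Bool × Bool × Bool) row =>
    let r := PySem.Str.strip (((PySem.Dict.mk row).get? "winner_by_aggregate_return").getD "")
    let o := PySem.Str.strip (((PySem.Dict.mk row).get? "winner_by_aggregate_objective").getD "")
    (s.1 && (r == "tie" && o == "tie"),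
     s.2.1 || (r == "anchor_no_be" && o == "anchor_no_be"),
     s.2.2 || (r == "anchor_with_be" && o == "anchor_with_be")))
    (!windows.isEmpty, false, false)
  if st.1 then "break_even_sidecar_no_observed_delta_keep_anchor"
  else if st.2.1 && !st.2.2 then "break_even_sidecar_not_promising_keep_anchor"
  else if st.2.2 && !st.2.1 then "break_even_sidecar_positive_watch_only"
  else if st.2.1 && st.2.2 then "break_even_sidecar_mixed_keep_anchor_watch_only"
  else "break_even_sidecar_inconclusive_keep_anchor"

-- ===== PRECONDITION & SPEC =====
def Spec_classify_sidecar_decision (windows : List (List (String × String))) (out : String) : Prop := out = classify_sidecar_decision_alt windows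
instance (windows : List (List (String × String))) (out : String) : Decidable (Spec_classify_sidecar_decision windows out) := by unfold Spec_classify_sidecar_decision; infer_instance

-- ===== CLAIM (what is proved, stated in full; the proofs are below) =====
def Claim_equal_classify_sidecar_decision : Prop := ∀ (windows : List (List (String × String))), Dom_classify_sidecar_decision windows → Spec_classify_sidecar_decision windows (classify_sidecar_decision windows)

-- ===== LEMMAS AND PROOFS =====

-- ===== VERDICT (by name: the statement is the Claim_ definition above) =====
-- the B fold computes (init.1 && all tie, init.2.1 || any no_be, init.2.2 || any with_be)
theorem pvFold_eq (l : List (List (String × String))) (a b c : Bool)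
    (t p q : List (String × String) → Bool) :
    l.foldl (fun (s : Bool × Bool × Bool) row =>
      (s.1 && t row, s.2.1 || p row, s.2.2 || q row)) (a, b, c)
    = (a && l.all t, b || l.any p, c || l.any q) := by
  induction l generalizing a b c with
  | nil => simp
  | cons x xs ih =>
    simp [List.foldl, ih, Bool.and_assoc, Bool.or_assoc]

theorem classify_sidecar_decision_spec : Claim_equal_classify_sidecar_decision := by
  intro windows _
  show classify_sidecar_decision windows = classify_sidecar_decision_alt windows
  unfold classify_sidecar_decision classify_sidecar_decision_alt
  rw [pvFold_eq]
  simp [pvText, Bool.and_comm]
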